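-- pv_equiv track=rewrite | github.com/ec-eileenchen/Mutation_Guides_Research | code_file/predictive_models/Preprocess (One Hot Encoding).py | max_runs
-- ===== SOURCE A (Python) =====
-- from itertools import groupby
--
-- def max_runs(row, nucleotide):
--     max_length = 0
--     for key, group in groupby(row):
--         if key == str(nucleotide):
--             group_list = list(group)
--             if len(group_list) > max_length:
--                 max_length = len(group_list)
--
--     return max_length
-- ===== SOURCE B (Python) =====
-- def max_runs(row, nucleotide):
--     target = str(nucleotide)
--     max_length = 0
--     current = 0
--     for ch in row:
--         current = current + 1 if ch == target else 0
--         if current > max_length: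
--             max_length = current
--     return max_length
-- ===== Notes on version B (the rewrite author's own statement) =====
-- stated objective: simpler
-- what changed: Replaces the itertools.groupby pass that materialises each run as a list with a single running-counter loop over the characters (increment on match, reset on mismatch, track the maximum).
import Mathlib
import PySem

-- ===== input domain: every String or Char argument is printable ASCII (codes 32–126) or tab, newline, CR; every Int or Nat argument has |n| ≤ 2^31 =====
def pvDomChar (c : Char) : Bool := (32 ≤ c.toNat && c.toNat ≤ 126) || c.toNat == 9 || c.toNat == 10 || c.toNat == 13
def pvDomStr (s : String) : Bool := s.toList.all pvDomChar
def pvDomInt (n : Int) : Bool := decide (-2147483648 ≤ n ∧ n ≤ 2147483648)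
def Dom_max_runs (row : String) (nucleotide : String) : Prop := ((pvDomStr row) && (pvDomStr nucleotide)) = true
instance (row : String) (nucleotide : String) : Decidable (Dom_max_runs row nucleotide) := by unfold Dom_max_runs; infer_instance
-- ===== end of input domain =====

-- B replaces A's itertools.groupby pass (which materialises each run as a list) by a
-- single running-counter loop: simpler, same O(n) cost.

-- ===== PORT A =====
-- itertools.groupby over a string: list of (key, group) with group the maximal run
def pyGroupby : List Char → List (Char × List Char)
  | [] => []
  | c :: rest =>
    (c, c :: rest.takeWhile (· == c)) :: pyGroupby (rest.dropWhile (· == c))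
termination_by l => l.length
decreasing_by simpa using Nat.lt_succ_of_le (List.length_dropWhile_le _ _)

def max_runs (row : String) (nucleotide : String) : Int :=
  (pyGroupby row.toList).foldl
    (fun max_length kg =>
      if String.ofList [kg.1] == nucleotide then
        (if (kg.2.length : Int) > max_length then (kg.2.length : Int) else max_length)
      else max_length) 0

-- ===== PORT B =====
def max_runs_alt (row : String) (nucleotide : String) : Int :=
  (row.toList.foldl
    (fun (s : Int × Int) ch =>
      let current := if String.ofList [ch] == nucleotide then s.1 + 1 else 0
      (current, if current > s.2 then current else s.2)) (0, 0)).2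

-- ===== PRECONDITION & SPEC =====
def Spec_max_runs (row : String) (nucleotide : String) (out : Int) : Prop := out = max_runs_alt row nucleotide
instance (row : String) (nucleotide : String) (out : Int) : Decidable (Spec_max_runs row nucleotide out) := by unfold Spec_max_runs; infer_instance

-- ===== CLAIM (what is proved, stated in full; the proofs are below) =====
def Claim_equal_max_runs : Prop := ∀ (row : String) (nucleotide : String), Dom_max_runs row nucleotide → Spec_max_runs row nucleotide (max_runs row nucleotide)

-- ===== LEMMAS AND PROOFS =====

def stepB (n : String) : Int × Int → Char → Int × Int :=
  fun s ch =>
    let current := if String.ofList [ch] == n then s.1 + 1 else 0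
    (current, if current > s.2 then current else s.2)

def stepA (n : String) : Int → Char × List Char → Int :=
  fun max_length kg =>
    if String.ofList [kg.1] == n then
      (if (kg.2.length : Int) > max_length then (kg.2.length : Int) else max_length)
    else max_length

theorem mk_singleton_inj {c d : Char} (h : String.ofList [c] = String.ofList [d]) : c = d := by
  have h2 := congrArg String.toList h
  simpa using h2

theorem stepB_match (n : String) (c : Char) (hc : (String.ofList [c] == n) = true) (s : Int × Int) :
    stepB n s c = (s.1 + 1, max s.2 (s.1 + 1)) := by
  simp only [stepB, hc, if_true, Prod.mk.injEq]
  refine ⟨by trivial, by split <;> omega⟩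

theorem stepB_nomatch (n : String) (d : Char) (hd : (String.ofList [d] == n) = false) (s : Int × Int)
    (h0 : 0 ≤ s.2) : stepB n s d = (0, s.2) := by
  simp only [stepB, hd, Bool.false_eq_true, if_false, Prod.mk.injEq]
  refine ⟨by trivial, by split <;> omega⟩

-- a run of matching characters: counter climbs, max follows
theorem runB_match (n : String) (c : Char) (hc : (String.ofList [c] == n) = true) :
    ∀ (r : List Char), (∀ d ∈ r, d = c) → ∀ (cur mx : Int), cur ≤ mx →
      List.foldl (stepB n) (cur, mx) r = (cur + r.length, max mx (cur + r.length)) := by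
  intro r
  induction r with
  | nil =>
    intro _ cur mx hle
    simp [max_eq_left hle]
  | cons d rs ih =>
    intro hall cur mx hle
    have hd : d = c := hall d (by simp)
    have hdc : (String.ofList [d] == n) = true := by rw [hd]; exact hc
    have h1 := ih (fun e he => hall e (by simp [he])) (cur + 1) (max mx (cur + 1)) (le_max_right _ _)
    rw [List.foldl_cons, stepB_match n d hdc (cur, mx), h1]
    simp only [Prod.mk.injEq, List.length_cons]
    push_cast
    omega

-- a stretch of non-matching characters from counter 0: nothing changes
theorem resetB (n : String) :
    ∀ (r : List Char), (∀ d ∈ r, (String.ofList [d] == n) = false) → ∀ (mx : Int), 0 ≤ mx →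
      List.foldl (stepB n) (0, mx) r = (0, mx) := by
  intro r
  induction r with
  | nil => intro _ mx _; rfl
  | cons d rs ih =>
    intro hall mx hmx
    have hd : (String.ofList [d] == n) = false := hall d (by simp)
    rw [List.foldl_cons, stepB_nomatch n d hd (0, mx) hmx]
    exact ih (fun d hd => hall d (by simp [hd])) mx hmx

theorem main_lemma (n : String) (l : List Char) (mx : Int) (hmx : 0 ≤ mx) :
    (List.foldl (stepB n) (0, mx) l).2 = List.foldl (stepA n) mx (pyGroupby l) := by
  match l with
  | [] => simp [pyGroupby]
  | c :: rest =>
    have hsplit : rest = rest.takeWhile (· == c) ++ rest.dropWhile (· == c) :=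
      (List.takeWhile_append_dropWhile).symm
    have htw : ∀ d ∈ rest.takeWhile (· == c), d = c := by
      intro d hd
      have := List.mem_takeWhile_imp hd
      simpa using this
    have hdwlen : (rest.dropWhile (· == c)).length < (c :: rest).length :=
      Nat.lt_succ_of_le (List.length_dropWhile_le _ _)
    rw [List.foldl_cons]
    conv_lhs => rw [hsplit]
    rw [List.foldl_append]
    by_cases hc : (String.ofList [c] == n) = true
    · -- the group matches
      have hstep : stepB n (0, mx) c = (1, max mx 1) := by
        rw [stepB_match n c hc]
        simp only [Prod.mk.injEq]
        exact ⟨by omega, by omega⟩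
      set tw := rest.takeWhile (· == c) with htwdef
      set dw := rest.dropWhile (· == c) with hdwdef
      have hrun := runB_match n c hc tw htw 1 (max mx 1) (le_max_right _ _)
      have hM : max (max mx 1) (1 + (tw.length:Int)) = max mx (1 + tw.length) := by
        have : (0:Int) ≤ tw.length := by positivity
        omega
      rw [hstep, hrun, hM]
      set M := max mx (1 + (tw.length:Int)) with hMdef
      have hM0 : 0 ≤ M := le_trans hmx (le_max_left _ _)
      -- the next character (if any) starts a different group, so it cannot match
      have htail : (List.foldl (stepB n) (1 + tw.length, M) dw).2 = (List.foldl (stepB n) (0, M) dw).2 := by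
        match hdw : dw with
        | [] => rfl
        | d :: ds =>
          have hdc : (d == c) = false := by
            have hh := List.head?_dropWhile_not (fun x => x == c) rest
            have heq : List.dropWhile (fun x => x == c) rest = d :: ds := by
              rw [← hdwdef]
              try exact hdw
            rw [heq] at hh
            simpa using hh
          have hdn : (String.ofList [d] == n) = false := by
            by_contra h
            have h' : String.ofList [d] = n := by
              have := eq_of_beq (a := String.ofList [d]) (b := n) (by revert h; cases (String.ofList [d] == n) <;> simp)
              exact this
            have hcn : String.ofList [c] = n := eq_of_beq hc
            have : d = c := mk_singleton_inj (h'.trans hcn.symm)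
            simp [this] at hdc
          rw [List.foldl_cons, List.foldl_cons]
          rw [stepB_nomatch n d hdn _ hM0, stepB_nomatch n d hdn _ hM0]
      have hih : (List.foldl (stepB n) (0, M) dw).2 = List.foldl (stepA n) M (pyGroupby dw) :=
        main_lemma n dw M hM0
      rw [htail, hih]
      -- A side
      have hA : pyGroupby (c :: rest) = (c, c :: tw) :: pyGroupby dw := by
        rw [pyGroupby]
      rw [hA, List.foldl_cons]
      have : stepA n mx (c, c :: tw) = M := by
        simp only [stepA, hc, if_true, List.length_cons, hMdef]
        push_cast
        split <;> omega
      rw [this]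
    · -- the group does not match: counter stays 0, max unchanged
      have hc' : (String.ofList [c] == n) = false := by
        revert hc; cases (String.ofList [c] == n) <;> simp
      have hstep : stepB n (0, mx) c = (0, mx) := stepB_nomatch n c hc' (0, mx) hmx
      set tw := rest.takeWhile (· == c) with htwdef
      set dw := rest.dropWhile (· == c) with hdwdef
      have htwn : ∀ d ∈ tw, (String.ofList [d] == n) = false := by
        intro d hd
        rw [htw d hd]; exact hc'
      rw [hstep, resetB n tw htwn mx hmx]
      have hih : (List.foldl (stepB n) (0, mx) dw).2 = List.foldl (stepA n) mx (pyGroupby dw) :=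
        main_lemma n dw mx hmx
      rw [hih]
      have hA : pyGroupby (c :: rest) = (c, c :: tw) :: pyGroupby dw := by
        rw [pyGroupby]
      rw [hA, List.foldl_cons]
      have : stepA n mx (c, c :: tw) = mx := by
        simp [stepA, hc']
      rw [this]
termination_by l.length
decreasing_by
  all_goals simpa [hdwdef] using hdwlen

-- ===== VERDICT (by name: the statement is the Claim_ definition above) =====
theorem max_runs_spec : Claim_equal_max_runs := by
  intro row nucleotide _
  unfold Spec_max_runs max_runs max_runs_alt
  exact (main_lemma nucleotide row.toList 0 le_rfl).symm
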